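-- pv_equiv track=rewrite | github.com/memospot/memos-builds | scripts/utils/semver.py | parse_build
-- ===== SOURCE A (Python) =====
-- def parse_build(v: str) -> tuple[str, str, bool]:
--     if not v or v[0] != "+":
--         return "", "", False
--     i = 1
--     start = 1
--     while i < len(v):
--         if not is_ident_char(v[i]) and v[i] != ".":
--             return "", "", False
--         if v[i] == ".":
--             if start == i:
--                 return "", "", False
--             start = i + 1
--         i += 1
--     if start == i:
--         return "", "", False
--     return v[:i], v[i:], True
--
-- def is_ident_char(c: str) -> bool:
--     return c.isalnum() or c == "-"
-- ===== SOURCE B (Python) =====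
-- def parse_build(v: str) -> tuple[str, str, bool]:
--     if not v.startswith("+"):
--         return "", "", False
--     segs = v[1:].split(".")
--     if all(seg != "" and all(is_ident_char(c) for c in seg) for seg in segs):
--         return v, "", True
--     return "", "", False
--
-- def is_ident_char(c: str) -> bool:
--     return c.isalnum() or c == "-"
-- ===== Notes on version B (the rewrite author's own statement) =====
-- stated objective: simpler
-- what changed: Replaced A's index/start while-loop state machine with a prefix check plus split-on-dot and a per-segment all() validation (reusing the is_ident_char helper).
import Mathlib
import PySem

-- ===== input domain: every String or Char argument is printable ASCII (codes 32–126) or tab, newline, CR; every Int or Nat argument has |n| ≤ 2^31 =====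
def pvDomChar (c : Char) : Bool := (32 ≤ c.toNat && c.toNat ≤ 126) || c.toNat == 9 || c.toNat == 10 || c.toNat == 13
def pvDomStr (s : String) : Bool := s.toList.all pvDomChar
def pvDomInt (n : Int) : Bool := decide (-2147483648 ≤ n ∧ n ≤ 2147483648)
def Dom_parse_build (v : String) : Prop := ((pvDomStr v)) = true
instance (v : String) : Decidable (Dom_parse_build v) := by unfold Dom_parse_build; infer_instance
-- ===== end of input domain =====

-- B replaces A's index/start while-loop state machine by a '+'-prefix check plus
-- split-on-dot with a per-segment validation; objective: simpler. Return value only; no mutation.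

-- ===== PORT A =====
-- helper is_ident_char (shared module helper, used by both Pythons)
def pvIsIdentChar (c : Char) : Bool := PySem.Chars.isalnum c || c == '-'

-- the while loop of A, over the char list with indices i and start
def pvLoopA (cs : List Char) (i start : Nat) : String × String × Bool :=
  if h : i < cs.length then
    if !pvIsIdentChar cs[i] && cs[i] != '.' then ("", "", false)
    else if cs[i] == '.' then
      if start == i then ("", "", false)
      else pvLoopA cs (i + 1) (i + 1)
    else pvLoopA cs (i + 1) start
  else
    if start == i then ("", "", false)
    else (String.ofList (PySem.List.slice cs none (some (i : Int))),
          String.ofList (PySem.List.slice cs (some (i : Int)) none), true)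
termination_by cs.length - i

def parse_build (v : String) : String × String × Bool :=
  match v.toList with
  | [] => ("", "", false)           -- not v
  | c :: _ => if c != '+' then ("", "", false)   -- v[0] != "+"
              else pvLoopA v.toList 1 1

-- ===== PORT B =====
def pvSegOk (seg : List Char) : Bool := seg != [] && seg.all pvIsIdentChar

def parse_build_alt (v : String) : String × String × Bool :=
  if PySem.Str.startswith v "+" then
    -- v[1:].split(".")  (split on the single char '.')
    let segs := (PySem.List.slice v.toList (some 1) none).splitOn '.'
    if segs.all pvSegOk then (v, "", true) else ("", "", false)
  else ("", "", false)

-- ===== PRECONDITION & SPEC =====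
def Spec_parse_build (v : String) (out : String × String × Bool) : Prop := out = parse_build_alt v
instance (v : String) (out : String × String × Bool) : Decidable (Spec_parse_build v out) := by unfold Spec_parse_build; infer_instance

-- ===== CLAIM (what is proved, stated in full; the proofs are below) =====
def Claim_equal_parse_build : Prop := ∀ (v : String), Dom_parse_build v → Spec_parse_build v (parse_build v)

-- ===== LEMMAS AND PROOFS =====

-- abstract state of A's loop: `started` = current segment already has a character
def pvChk : List Char → Bool → Bool
  | [], started => started
  | c :: rest, started =>
    if !pvIsIdentChar c && c != '.' then false
    else if c == '.' then (if started then pvChk rest false else false)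
    else pvChk rest true

theorem slice_all (cs : List Char) :
    PySem.List.slice cs none (some (cs.length : Int)) = cs := by
  simp [PySem.List.slice_to]

theorem slice_none (cs : List Char) :
    PySem.List.slice cs (some (cs.length : Int)) none = [] := by
  simp [PySem.List.slice_from]

theorem pvLoopA_eq (cs : List Char) (i start : Nat) (hle : start ≤ i) (hi : i ≤ cs.length) :
    pvLoopA cs i start =
      if pvChk (cs.drop i) (start != i) then (String.ofList cs, "", true) else ("", "", false) := by
  induction hn : cs.length - i using Nat.strong_induction_on generalizing i start with
  | _ n ih =>
    rw [pvLoopA]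
    by_cases h : i < cs.length
    · have hdrop : cs.drop i = cs[i] :: cs.drop (i + 1) := List.drop_eq_getElem_cons h
      rw [dif_pos h, hdrop]
      rw [show pvChk (cs[i] :: cs.drop (i + 1)) (start != i) =
        (if !pvIsIdentChar cs[i] && cs[i] != '.' then false
        else if cs[i] == '.' then (if (start != i) then pvChk (cs.drop (i + 1)) false else false)
        else pvChk (cs.drop (i + 1)) true) from rfl]
      by_cases hbad : (!pvIsIdentChar cs[i] && cs[i] != '.') = true
      · rw [if_pos hbad, if_pos hbad]; simp
      · rw [if_neg hbad, if_neg hbad]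
        by_cases hdot : (cs[i] == '.') = true
        · rw [if_pos hdot, if_pos hdot]
          by_cases hsi : start = i
          · subst hsi
            rw [if_pos (by simp), if_neg (by simp)]
          · have hne : (start != i) = true := by simp [hsi]
            rw [if_neg (by simp [hsi]), if_pos hne,
              ih (cs.length - (i + 1)) (by omega) (i + 1) (i + 1) le_rfl (by omega) rfl]
            simp
        · rw [if_neg hdot, if_neg hdot,
            ih (cs.length - (i + 1)) (by omega) (i + 1) start (by omega) (by omega) rfl]
          have hne : (start != i + 1) = true := by simp; omega
          rw [hne]
    · have hieq : i = cs.length := by omega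
      subst hieq
      rw [dif_neg h, List.drop_length]
      by_cases hsi : start = cs.length
      · subst hsi
        rw [if_pos (by simp)]
        rw [show pvChk [] ((cs.length : Nat) != cs.length) = ((cs.length : Nat) != cs.length) from rfl]
        simp
      · have hne : (start != cs.length) = true := by simp [hsi]
        rw [if_neg (by simp [hsi]),
          show pvChk [] (start != cs.length) = (start != cs.length) from rfl, hne,
          if_pos rfl, slice_all, slice_none]

theorem pvChk_splitOn (cs : List Char) (started : Bool) (s : List Char)
    (rest : List (List Char)) (h : cs.splitOn '.' = s :: rest) :
    pvChk cs started = ((started || s != []) && s.all pvIsIdentChar && rest.all pvSegOk) := by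
  induction cs generalizing started s rest with
  | nil =>
    rw [List.splitOn_nil] at h
    obtain ⟨rfl, rfl⟩ := List.cons.injEq .. ▸ h
    simp [pvChk]
  | cons c cs' ih =>
    obtain ⟨s', rest', hr⟩ : ∃ s' rest', cs'.splitOn '.' = s' :: rest' := by
      rcases h' : cs'.splitOn '.' with _ | ⟨s', rest'⟩
      · exact (List.splitOnP_ne_nil _ _ h').elim
      · exact ⟨s', rest', rfl⟩
    have hsplit : (c :: cs').splitOn '.' =
        if c == '.' then [] :: cs'.splitOn '.'
        else (cs'.splitOn '.').modifyHead (List.cons c) := by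
      simp [List.splitOn, List.splitOnP_cons]
    by_cases hdot : c = '.'
    · subst hdot
      rw [hsplit, if_pos (by simp), hr] at h
      obtain ⟨rfl, rfl⟩ := List.cons.injEq .. ▸ h
      have hni : pvIsIdentChar '.' = false := by decide
      rw [show pvChk ('.' :: cs') started =
        (if !pvIsIdentChar '.' && '.' != '.' then false
         else if '.' == '.' then (if started then pvChk cs' false else false)
         else pvChk cs' true) from rfl]
      rw [if_neg (by simp), if_pos (by simp)]
      cases started with
      | false => simp
      | true =>
        rw [if_pos rfl, ih false s' rest' hr]
        simp [pvSegOk, Bool.and_assoc]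
    · rw [hsplit, if_neg (by simp [hdot]), hr, List.modifyHead] at h
      obtain ⟨rfl, rfl⟩ := List.cons.injEq .. ▸ h
      rw [show pvChk (c :: cs') started =
        (if !pvIsIdentChar c && c != '.' then false
         else if c == '.' then (if started then pvChk cs' false else false)
         else pvChk cs' true) from rfl]
      by_cases hid : pvIsIdentChar c
      · rw [if_neg (by simp [hid]), if_neg (by simp [hdot]), ih true s' rest' hr,
          show (started || (c :: s' != [])) = true from by simp, Bool.true_and,
          show (c :: s').all pvIsIdentChar = (pvIsIdentChar c && s'.all pvIsIdentChar) from by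
            simp, hid, Bool.true_and, Bool.true_or, Bool.true_and]
      · rw [if_pos (by simp [hid, hdot])]
        simp [hid]

-- ===== VERDICT (by name: the statement is the Claim_ definition above) =====
theorem parse_build_spec : Claim_equal_parse_build := by
  intro v _
  unfold Spec_parse_build parse_build parse_build_alt
  rcases hv : v.toList with _ | ⟨c, rest⟩
  · have hsw : PySem.Str.startswith v "+" = false := by
      rw [PySem.Str.startswith_eq, hv]; decide
    rw [hsw]
    simp
  · by_cases hc : c = '+'
    · subst hc
      have hsw : PySem.Str.startswith v "+" = true := by
        rw [PySem.Str.startswith_eq, hv]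
        rw [show ("+" : String).toList = ['+'] from by decide, PySem.Chars.startswith_iff]
        exact ⟨rest, rfl⟩
      have hslice : PySem.List.slice ('+' :: rest) (some 1) none = rest := by
        simp [PySem.List.slice_from]
      simp only [hsw, hslice, bne_self_eq_false, Bool.false_eq_true, if_false, if_true]
      rw [pvLoopA_eq ('+' :: rest) 1 1 le_rfl (by simp)]
      rw [show ('+' :: rest).drop 1 = rest from rfl,
        show ((1 : Nat) != 1) = false from by decide]
      obtain ⟨s', rest', hr⟩ : ∃ s' rest', rest.splitOn '.' = s' :: rest' := by
        rcases h : rest.splitOn '.' with _ | ⟨s', rest'⟩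
        · exact (List.splitOnP_ne_nil _ _ h).elim
        · exact ⟨s', rest', rfl⟩
      rw [pvChk_splitOn rest false s' rest' hr, hr]
      have hmk : String.ofList ('+' :: rest) = v := by rw [← hv, String.ofList_toList]
      rw [hmk]
      rw [show ((false || s' != []) && s'.all pvIsIdentChar && rest'.all pvSegOk)
            = (s' :: rest').all pvSegOk from by simp [pvSegOk, Bool.and_assoc]]
    · have hne : (c != '+') = true := by simp [hc]
      have hsw' : PySem.Chars.startswith (c :: rest) ['+'] = false := by
        rw [Bool.eq_false_iff]
        intro hp
        rw [PySem.Chars.startswith_iff] at hp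
        rcases hp with ⟨t, ht⟩
        exact hc (List.cons.injEq .. ▸ ht).1.symm
      simp [hv, hne, hsw']
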